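-- pv_equiv track=rewrite | github.com/Kawser-nerd/CLCDSA | Source Codes/CodeJamData/09/21/14.py | find_opening_paren
-- ===== SOURCE A (Python) =====
-- def find_opening_paren(content):
--     depth = 0
--     p = []
--     for i, c in enumerate(content):
--         if c == '(':
--             if depth == 0:
--                 p.append(i)
--             depth += 1
--         elif c == ')':
--             depth -= 1
--     return p
-- ===== SOURCE B (Python) =====
-- def find_opening_paren(content):
--     s = 0
--     before = []
--     for c in content:
--         before.append(s)
--         s += (c == '(') - (c == ')')
--     return [i for i, (c, d) in enumerate(zip(content, before)) if c == '(' and d == 0]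
-- ===== Notes on version B (the rewrite author's own statement) =====
-- stated objective: alternative
-- what changed: Replaces the fused loop (depth counter updated and indices emitted in the same iteration) by two phases: first build a table of the depth before each position by exclusive prefix sums of open/close deltas, then select with a comprehension the indices holding an opening parenthesis at depth-before zero.
import Mathlib
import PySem

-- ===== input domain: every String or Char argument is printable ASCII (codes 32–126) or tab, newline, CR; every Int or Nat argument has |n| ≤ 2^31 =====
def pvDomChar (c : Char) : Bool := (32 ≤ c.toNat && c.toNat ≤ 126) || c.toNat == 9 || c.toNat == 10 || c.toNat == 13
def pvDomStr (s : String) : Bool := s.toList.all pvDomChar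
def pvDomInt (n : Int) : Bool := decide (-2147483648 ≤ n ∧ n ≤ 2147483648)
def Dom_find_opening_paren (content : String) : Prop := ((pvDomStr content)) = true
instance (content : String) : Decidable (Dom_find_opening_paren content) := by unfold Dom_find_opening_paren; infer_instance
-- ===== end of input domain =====

-- B replaces A's fused depth-counting/emitting loop by a depth-before table (exclusive
-- prefix sums of paren deltas) followed by a separate selection pass (objective: alternative).

-- ===== PORT A =====
def find_opening_paren (content : String) : List Int :=
  ((PySem.List.enumerate content.toList 0).foldl
    (fun (st : Int × List Int) ic =>
      if ic.2 = '(' then (st.1 + 1, if st.1 = 0 then st.2 ++ [ic.1] else st.2)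
      else if ic.2 = ')' then (st.1 - 1, st.2)
      else st)
    (0, [])).2

-- ===== PORT B =====
def find_opening_paren_alt (content : String) : List Int :=
  let cs := content.toList
  let before := (cs.foldl
    (fun (st : List Int × Int) c =>
      (st.1 ++ [st.2], st.2 + ((if c = '(' then (1 : Int) else 0) - (if c = ')' then 1 else 0))))
    ([], 0)).1
  ((PySem.List.enumerate (cs.zip before) 0).filter
    (fun x => decide (x.2.1 = '(' ∧ x.2.2 = 0))).map (·.1)

-- ===== PRECONDITION & SPEC =====
def Spec_find_opening_paren (content : String) (out : List Int) : Prop := out = find_opening_paren_alt content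
instance (content : String) (out : List Int) : Decidable (Spec_find_opening_paren content out) := by unfold Spec_find_opening_paren; infer_instance

-- ===== CLAIM (what is proved, stated in full; the proofs are below) =====
def Claim_equal_find_opening_paren : Prop := ∀ (content : String), Dom_find_opening_paren content → Spec_find_opening_paren content (find_opening_paren content)

-- ===== LEMMAS AND PROOFS =====

-- reference result: indices of top-level '(' in cs, starting at index i with current depth d
def pvRef : List Char → Int → Int → List Int
  | [], _, _ => []
  | c :: cs, i, d =>
    (if c = '(' ∧ d = 0 then [i] else []) ++
      pvRef cs (i + 1) (d + ((if c = '(' then (1 : Int) else 0) - (if c = ')' then 1 else 0)))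

-- exclusive prefix sums of deltas (the depth before each position)
def pvScan : List Char → Int → List Int
  | [], _ => []
  | c :: cs, s => s :: pvScan cs (s + ((if c = '(' then (1 : Int) else 0) - (if c = ')' then 1 else 0)))

theorem pvA_loop (cs : List Char) : ∀ (i d : Int) (p : List Int),
    ((PySem.List.enumerate cs i).foldl
      (fun (st : Int × List Int) ic =>
        if ic.2 = '(' then (st.1 + 1, if st.1 = 0 then st.2 ++ [ic.1] else st.2)
        else if ic.2 = ')' then (st.1 - 1, st.2)
        else st)
      (d, p)).2 = p ++ pvRef cs i d := by
  induction cs with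
  | nil => intro i d p; simp [PySem.List.enumerate_nil, pvRef]
  | cons c cs ih =>
    intro i d p
    rw [PySem.List.enumerate_cons]
    simp only [List.foldl_cons]
    by_cases hc : c = '('
    · by_cases hd : d = 0 <;>
        simp [hc, hd, pvRef, ih]
    · by_cases hc2 : c = ')'
      · simp [hc, hc2, pvRef, ih]
        ring_nf
      · simp [hc, hc2, pvRef, ih]

theorem pvB_table (cs : List Char) : ∀ (s : Int) (acc : List Int),
    (cs.foldl
      (fun (st : List Int × Int) c =>
        (st.1 ++ [st.2], st.2 + ((if c = '(' then (1 : Int) else 0) - (if c = ')' then 1 else 0))))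
      (acc, s)).1 = acc ++ pvScan cs s := by
  induction cs with
  | nil => intro s acc; simp [pvScan]
  | cons c cs ih => intro s acc; simp [pvScan, ih]

theorem pvB_select (cs : List Char) : ∀ (i s : Int),
    ((PySem.List.enumerate (cs.zip (pvScan cs s)) i).filter
      (fun x => decide (x.2.1 = '(' ∧ x.2.2 = 0))).map (·.1) = pvRef cs i s := by
  induction cs with
  | nil => intro i s; simp [pvScan, PySem.List.enumerate_nil, pvRef]
  | cons c cs ih =>
    intro i s
    rw [pvScan]
    rw [List.zip_cons_cons, PySem.List.enumerate_cons, List.filter_cons]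
    by_cases h : c = '(' ∧ s = 0
    · rw [if_pos (by simpa using h)]
      simp only [List.map_cons]
      rw [ih]
      simp [pvRef, h]
    · rw [if_neg (by simpa using h)]
      rw [ih]
      simp [pvRef, h]

-- ===== VERDICT (by name: the statement is the Claim_ definition above) =====
theorem find_opening_paren_spec : Claim_equal_find_opening_paren := by
  intro content _
  unfold Spec_find_opening_paren find_opening_paren
  rw [pvA_loop]
  simp only [find_opening_paren_alt]
  rw [pvB_table]
  simp only [List.nil_append]
  rw [pvB_select]
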